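-- pv_equiv track=rewrite | github.com/venniseho/UofT_Visual_Course_Map | data_cleaning.py | check_existence
-- ===== SOURCE A (Python) =====
-- def check_existence(courses: list[str], requisites: str) -> str:
--     """
--     Checks if a given course exists in courses and removes it from requisites if it doesn't.
--
--     >>> c = ['CSC111', 'CSC110']
--     >>> r = 'MAT137'
--     >>> check_existence(c, r)
--     ''
--
--     >>> r = 'MAT135/MAT136,CSC111,CSC110'
--     >>> check_existence(c, r)
--     '/,CSC111,CSC110'
--
--
--     Preconditions:
--     - all([char != ' ' for char in s])
--     """
--     requisites_list = split_string(requisites)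
--
--     i = 0
--     while i < len(requisites_list):
--         substring = requisites_list[i]
--         if substring.isalnum() and substring not in courses:
--             requisites_list.pop(i)
--
--         else:
--             i += 1
--
--     return ''.join(requisites_list)
--
-- def split_string(s: str) -> list:
--     """
--     Splits a string into by comma, forward slash, and brackets and adds each element to a list.
--
--     >>> split_string('(MAT135,MAT136)/MAT137')
--     ['(', 'MAT135', ',', 'MAT136', ')', '/', 'MAT137']
--
--     Preconditions:
--     - all([char != ' ' for char in s])
--     """
--     split_lst = []
--     curr_str = ''
--     for char in s:
--         if char in [',', '/', '(', ')']:
--             if curr_str != '':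
--                 split_lst.append(curr_str)
--                 curr_str = ''
--
--             split_lst.append(char)
--
--         else:
--             curr_str += char
--
--     if curr_str != '':
--         split_lst.append(curr_str)
--
--     return split_lst
-- ===== SOURCE B (Python) =====
-- def check_existence(courses: list[str], requisites: str) -> str:
--     """Single streaming pass: no intermediate token list, no index/pop loop."""
--     out = []
--     word = ''
--     for ch in requisites:
--         if ch in ',/()':
--             if word and not (word.isalnum() and word not in courses):
--                 out.append(word)
--             out.append(ch)
--             word = ''
--         else:
--             word += ch
--     if word and not (word.isalnum() and word not in courses):
--         out.append(word)
--     return ''.join(out)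
-- ===== Notes on version B (the rewrite author's own statement) =====
-- stated objective: simpler
-- what changed: Replaces A's split-into-token-list followed by an index/pop while-loop filter and a join with one streaming pass over the characters that flushes each word under the keep-rule as it is completed.
import Mathlib
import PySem

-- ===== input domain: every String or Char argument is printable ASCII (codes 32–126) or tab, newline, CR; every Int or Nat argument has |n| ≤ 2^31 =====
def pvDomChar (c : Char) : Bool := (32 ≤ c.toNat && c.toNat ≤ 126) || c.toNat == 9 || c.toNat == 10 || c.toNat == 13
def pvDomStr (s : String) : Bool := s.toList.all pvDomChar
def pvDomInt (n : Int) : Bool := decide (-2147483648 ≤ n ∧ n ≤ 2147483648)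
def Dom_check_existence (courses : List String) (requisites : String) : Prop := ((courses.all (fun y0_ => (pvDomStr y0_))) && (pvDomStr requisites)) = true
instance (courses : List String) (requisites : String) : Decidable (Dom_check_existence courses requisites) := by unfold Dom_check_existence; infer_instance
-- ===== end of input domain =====

-- B changes the decomposition: one streaming pass with an in-loop keep-rule instead of
-- A's token-list split followed by an index/pop filter loop and a join (objective: simpler).

-- ===== PORT A =====
-- char in [',', '/', '(', ')']
def pvSep (c : Char) : Bool := c == ',' || c == '/' || c == '(' || c == ')'

-- split_string: the for-loop as a foldl over the characters, state (split_lst, curr_str)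
def split_string (s : String) : List String :=
  let st := s.toList.foldl
    (fun (acc : List String × List Char) c =>
      if pvSep c then
        ((if acc.2 ≠ [] then acc.1 ++ [String.ofList acc.2] else acc.1) ++ [String.ofList [c]], [])
      else (acc.1, acc.2 ++ [c]))
    ([], [])
  if st.2 ≠ [] then st.1 ++ [String.ofList st.2] else st.1

-- the while-loop with index i; lst.pop(i) on an in-range i is exactly eraseIdx i
def pvLoopA (courses : List String) (lst : List String) (i : Nat) : List String :=
  if h : i < lst.length then
    let substring := lst[i]
    if PySem.Str.strIsalnum substring && !(courses.contains substring) then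
      pvLoopA courses (lst.eraseIdx i) i
    else
      pvLoopA courses lst (i + 1)
  else lst
termination_by lst.length - i
decreasing_by
  · have := List.length_eraseIdx_of_lt (l := lst) (i := i) h; omega
  · omega

def check_existence (courses : List String) (requisites : String) : String :=
  PySem.Str.join "" (pvLoopA courses (split_string requisites) 0)

-- ===== PORT B =====
-- Source B's flush of the current word under the keep-rule (word built char by char)
def pvFlush (courses : List String) (word : List Char) : List String :=
  if word ≠ [] ∧ ¬(PySem.Str.strIsalnum (String.ofList word) ∧ ¬ courses.contains (String.ofList word))
  then [String.ofList word] else []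

def check_existence_alt (courses : List String) (requisites : String) : String :=
  let st := requisites.toList.foldl
    (fun (acc : List String × List Char) c =>
      if c == ',' || c == '/' || c == '(' || c == ')' then
        (acc.1 ++ pvFlush courses acc.2 ++ [String.ofList [c]], [])
      else (acc.1, acc.2 ++ [c]))
    ([], [])
  PySem.Str.join "" (st.1 ++ pvFlush courses st.2)

-- ===== PRECONDITION & SPEC =====
def Spec_check_existence (courses : List String) (requisites : String) (out : String) : Prop := out = check_existence_alt courses requisites
instance (courses : List String) (requisites : String) (out : String) : Decidable (Spec_check_existence courses requisites out) := by unfold Spec_check_existence; infer_instance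

-- ===== CLAIM (what is proved, stated in full; the proofs are below) =====
def Claim_equal_check_existence : Prop := ∀ (courses : List String) (requisites : String), Dom_check_existence courses requisites → Spec_check_existence courses requisites (check_existence courses requisites)

-- ===== LEMMAS AND PROOFS =====

-- the keep-rule as a Bool predicate on tokens ('not (isalnum and not in courses)')
def pvKeep (courses : List String) (w : String) : Bool :=
  !(PySem.Str.strIsalnum w && !(courses.contains w))

-- A's pop-loop is a filter of the tail from i
theorem pvLoopA_eq_filter (courses : List String) (lst : List String) (i : Nat) :
    pvLoopA courses lst i = lst.take i ++ (lst.drop i).filter (pvKeep courses) := by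
  fun_induction pvLoopA courses lst i
  case case1 i h sub hc ih =>
    rename_i lst
    rw [ih, List.eraseIdx_eq_take_drop_succ]
    have hlen : (lst.take i).length = i := by simp; omega
    rw [List.take_left' hlen, List.drop_left' hlen]
    have hd : lst.drop i = lst[i] :: lst.drop (i+1) := (List.getElem_cons_drop h).symm
    rw [hd, List.filter_cons]
    have : pvKeep courses lst[i] = false := by
      simp [pvKeep, sub] at hc ⊢; tauto
    simp [this]
  case case2 i h sub hc ih =>
    rename_i lst
    rw [ih]
    have hd : lst.drop i = lst[i] :: lst.drop (i+1) := (List.getElem_cons_drop h).symm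
    rw [hd, List.filter_cons]
    have : pvKeep courses lst[i] = true := by
      simp [pvKeep, sub] at hc ⊢
      cases hb : PySem.Chars.strIsalnum lst[i].toList with
      | false => exact Or.inl rfl
      | true => exact Or.inr (hc hb)
    simp only [List.take_add_one, List.getElem?_eq_getElem h, Option.toList_some,
      List.append_assoc, List.singleton_append, this, if_pos]
  case case3 i h =>
    rename_i lst
    rw [List.drop_eq_nil_of_le (by omega : lst.length ≤ i),
        List.take_of_length_le (by omega : lst.length ≤ i)]
    simp

-- flushing the current word = filtering its optional token
theorem pvFlush_eq (courses : List String) (w : List Char) :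
    pvFlush courses w =
      (if w ≠ [] then [String.ofList w] else []).filter (pvKeep courses) := by
  by_cases hw : w = []
  · simp [pvFlush, hw]
  · by_cases h1 : PySem.Chars.strIsalnum w = true <;>
      by_cases h2 : String.ofList w ∈ courses <;>
        simp [pvFlush, pvKeep, hw, List.filter, h1, h2]

-- a separator token is never alphanumeric, hence always kept
theorem pvKeep_sep (courses : List String) (c : Char) (h : pvSep c = true) :
    pvKeep courses (String.ofList [c]) = true := by
  have hfa : PySem.Chars.strIsalnum [c] = false := by
    simp only [pvSep, Bool.or_eq_true, beq_iff_eq] at h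
    rcases h with ((h | h) | h) | h <;> subst h <;> decide
  simp [pvKeep, hfa]

-- B's fold carries exactly the filtered version of A's split-fold state
theorem pvFold_rel (courses : List String) (s : List Char) (L : List String) (w : List Char) :
    s.foldl
      (fun (acc : List String × List Char) c =>
        if c == ',' || c == '/' || c == '(' || c == ')' then
          (acc.1 ++ pvFlush courses acc.2 ++ [String.ofList [c]], [])
        else (acc.1, acc.2 ++ [c]))
      (L.filter (pvKeep courses), w)
    = (((s.foldl
        (fun (acc : List String × List Char) c =>
          if pvSep c then
            ((if acc.2 ≠ [] then acc.1 ++ [String.ofList acc.2] else acc.1) ++ [String.ofList [c]], [])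
          else (acc.1, acc.2 ++ [c]))
        (L, w)).1).filter (pvKeep courses),
       (s.foldl
        (fun (acc : List String × List Char) c =>
          if pvSep c then
            ((if acc.2 ≠ [] then acc.1 ++ [String.ofList acc.2] else acc.1) ++ [String.ofList [c]], [])
          else (acc.1, acc.2 ++ [c]))
        (L, w)).2) := by
  induction s generalizing L w with
  | nil => simp
  | cons c s ih =>
    simp only [List.foldl_cons]
    by_cases hc : pvSep c
    · have hsep : (c == ',' || c == '/' || c == '(' || c == ')') = true := hc
      simp only [hsep, pvSep, if_pos]
      have key : L.filter (pvKeep courses) ++ pvFlush courses w ++ [String.ofList [c]]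
          = (((if w ≠ [] then L ++ [String.ofList w] else L) ++ [String.ofList [c]]).filter (pvKeep courses)) := by
        rw [pvFlush_eq]
        by_cases hw : w = []
        · simp [hw, List.filter_append, List.filter, pvKeep_sep courses c hc]
        · cases hk : pvKeep courses (String.ofList w) <;>
            simp [hw, List.filter_append, List.filter, pvKeep_sep courses c hc, hk]
      rw [key]
      exact ih _ []
    · have hsep : (c == ',' || c == '/' || c == '(' || c == ')') = false := by
        simpa [pvSep] using hc
      simp only [hsep, pvSep, Bool.false_eq_true, if_false]
      exact ih L (w ++ [c])

-- final step at token level: A's loop+join on the closed tokens vs B's filtered list+flush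
theorem pvFinal (courses : List String) (L : List String) (w : List Char) :
    PySem.Str.join "" (pvLoopA courses (if w ≠ [] then L ++ [String.ofList w] else L) 0)
      = PySem.Str.join "" (L.filter (pvKeep courses) ++ pvFlush courses w) := by
  rw [pvLoopA_eq_filter, pvFlush_eq]
  by_cases hw : w = [] <;> simp [hw, List.filter_append]

-- ===== VERDICT (by name: the statement is the Claim_ definition above) =====
theorem check_existence_spec : Claim_equal_check_existence := by
  intro courses requisites _
  unfold Spec_check_existence check_existence check_existence_alt split_string
  simp only []
  have h := pvFold_rel courses requisites.toList [] []
  simp only [List.filter_nil] at h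
  rw [h]
  exact pvFinal courses
    (requisites.toList.foldl
      (fun (acc : List String × List Char) c =>
        if pvSep c then
          ((if acc.2 ≠ [] then acc.1 ++ [String.ofList acc.2] else acc.1) ++ [String.ofList [c]], [])
        else (acc.1, acc.2 ++ [c]))
      ([], [])).1
    (requisites.toList.foldl
      (fun (acc : List String × List Char) c =>
        if pvSep c then
          ((if acc.2 ≠ [] then acc.1 ++ [String.ofList acc.2] else acc.1) ++ [String.ofList [c]], [])
        else (acc.1, acc.2 ++ [c]))
      ([], [])).2
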